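-- pv_equiv track=rewrite | github.com/Spooore/padt1 | delete_annotations.py | search_for_braces
-- ===== SOURCE A (Python) =====
-- def search_for_braces(document):
--     i = 0
--     opening = list()
--     closing = list()
--     while i != -1:
--         i = document.find('<', i)
--         opening.append(i)
--         if i == -1:
--             closing.append(-1)
--             break
--         i = document.find('>', i)
--         closing.append(i)
--     return(opening, closing)
-- ===== SOURCE B (Python) =====
-- def search_for_braces(document):
--     opening = []
--     closing = []
--     expect_open = True
--     for idx, ch in enumerate(document):
--         if expect_open:
--             if ch == '<':
--                 opening.append(idx)
--                 expect_open = False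
--         elif ch == '>':
--             closing.append(idx)
--             expect_open = True
--     if expect_open:
--         opening.append(-1)
--     closing.append(-1)
--     return (opening, closing)
-- ===== Notes on version B (the rewrite author's own statement) =====
-- stated objective: alternative
-- what changed: Replaces the while-loop of repeated str.find calls (with its mutable search index) by a single enumerate pass over the characters driven by an expect_open boolean state, flushing the -1 sentinels in one post-loop step.
import Mathlib
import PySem

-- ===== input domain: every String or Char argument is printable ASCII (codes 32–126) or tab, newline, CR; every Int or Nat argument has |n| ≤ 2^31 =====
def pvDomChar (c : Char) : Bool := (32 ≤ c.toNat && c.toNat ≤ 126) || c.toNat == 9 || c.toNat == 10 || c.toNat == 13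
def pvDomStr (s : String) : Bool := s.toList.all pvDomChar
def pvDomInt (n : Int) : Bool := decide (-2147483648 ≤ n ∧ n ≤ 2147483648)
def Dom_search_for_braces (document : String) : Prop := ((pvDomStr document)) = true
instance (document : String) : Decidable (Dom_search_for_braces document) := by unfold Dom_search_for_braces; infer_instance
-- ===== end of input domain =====

-- B replaces A's while-loop of repeated str.find calls by a single enumerate pass with an
-- expect_open boolean state (objective: alternative decomposition, same O(n) cost).

-- ===== PORT A =====
-- document.find(ch, i) for a single character ch, written on the suffix of the
-- document starting at index i: pyFindChar suffix ch = offset of the first ch in the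
-- suffix (exact: Python's str.find scans left to right from the start position).
def pyFindChar : List Char → Char → Option Nat
  | [], _ => none
  | x :: xs, c => if x == c then some 0 else (pyFindChar xs c).map (· + 1)

-- lemmas the port's own termination proof cites (by name in decreasing_by)
theorem pyFindChar_some_spec (l : List Char) (c : Char) (k : Nat)
    (h : pyFindChar l c = some k) :
    k < l.length ∧ (∀ x ∈ l.take k, x ≠ c) ∧ l.drop k = c :: l.drop (k + 1) := by
  induction l generalizing k with
  | nil => simp [pyFindChar] at h
  | cons x xs ih =>
    by_cases hx : x = c
    · simp [pyFindChar, hx] at h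
      subst h hx
      simp
    · simp [pyFindChar, hx] at h
      obtain ⟨k', hk', rfl⟩ := h
      obtain ⟨h1, h2, h3⟩ := ih k' hk'
      refine ⟨by simpa using h1, ?_, by simpa using h3⟩
      intro y hy
      simp [List.take_succ_cons] at hy
      rcases hy with rfl | hy
      · exact hx
      · exact h2 y hy

theorem pyFindChar_cons_ne (x : Char) (xs : List Char) (c : Char) (m : Nat)
    (hx : x ≠ c) (h : pyFindChar (x :: xs) c = some m) : 1 ≤ m := by
  simp [pyFindChar, hx] at h
  obtain ⟨m', _, rfl⟩ := h
  omega

-- A's while loop: cs is the suffix of the document starting at absolute index i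
-- (the search index of the Python loop); each iteration finds '<' then '>' as A does.
def aLoop (cs : List Char) (i : Int) : List Int × List Int :=
  match h1 : pyFindChar cs '<' with
  | none => ([-1], [-1])                                    -- opening.append(-1); closing.append(-1); break
  | some k =>
    match h2 : pyFindChar (cs.drop k) '>' with
    | none => ([i + (k : Int)], [-1])                       -- opening.append(i); '>' not found: closing.append(-1), loop exits
    | some m =>
      let next := aLoop ((cs.drop k).drop m) (i + (k : Int) + (m : Int))
      ((i + (k : Int)) :: next.1, (i + (k : Int) + (m : Int)) :: next.2)
  termination_by cs.length
  decreasing_by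
    obtain ⟨hk, -, hdrop⟩ := pyFindChar_some_spec _ _ _ h1
    have hm : 1 ≤ m := by
      rw [hdrop] at h2
      exact pyFindChar_cons_ne _ _ _ _ (by decide) h2
    simp only [List.length_drop]
    omega

def search_for_braces (document : String) : List Int × List Int :=
  aLoop document.toList 0

-- ===== PORT B =====
-- one step of B's enumerate loop; state = (opening, closing, expect_open)
def bStep (st : List Int × List Int × Bool) (p : Int × Char) : List Int × List Int × Bool :=
  match st with
  | (opening, closing, eo) =>
    if eo then
      if p.2 == '<' then (opening ++ [p.1], closing, false) else st
    else
      if p.2 == '>' then (opening, closing ++ [p.1], true) else st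

-- B's post-loop flush of the -1 sentinels
def bFlush (st : List Int × List Int × Bool) : List Int × List Int :=
  match st with
  | (opening, closing, eo) =>
    if eo then (opening ++ [-1], closing ++ [-1]) else (opening, closing ++ [-1])

def search_for_braces_alt (document : String) : List Int × List Int :=
  bFlush ((PySem.List.enumerate document.toList 0).foldl bStep ([], [], true))

-- ===== PRECONDITION & SPEC =====
def Spec_search_for_braces (document : String) (out : List Int × List Int) : Prop := out = search_for_braces_alt document
instance (document : String) (out : List Int × List Int) : Decidable (Spec_search_for_braces document out) := by unfold Spec_search_for_braces; infer_instance

-- ===== CLAIM (what is proved, stated in full; the proofs are below) =====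
def Claim_equal_search_for_braces : Prop := ∀ (document : String), Dom_search_for_braces document → Spec_search_for_braces document (search_for_braces document)

-- ===== LEMMAS AND PROOFS =====

theorem pyFindChar_eq_none_iff (l : List Char) (c : Char) :
    pyFindChar l c = none ↔ ∀ x ∈ l, x ≠ c := by
  induction l with
  | nil => simp [pyFindChar]
  | cons x xs ih =>
    by_cases hx : x = c
    · simp [pyFindChar, hx]
    · simp [pyFindChar, hx, ih]

-- unfolding equations for aLoop, one per branch
theorem aLoop_none (cs : List Char) (i : Int) (h1 : pyFindChar cs '<' = none) :
    aLoop cs i = ([-1], [-1]) := by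
  rw [aLoop]
  split <;> simp_all

theorem aLoop_some_none (cs : List Char) (i : Int) (k : Nat)
    (h1 : pyFindChar cs '<' = some k) (h2 : pyFindChar (cs.drop k) '>' = none) :
    aLoop cs i = ([i + (k : Int)], [-1]) := by
  rw [aLoop]
  split
  · simp_all
  · rename_i k' h1'
    rw [h1'] at h1
    injection h1 with h1
    subst h1
    split <;> simp_all

theorem aLoop_some_some (cs : List Char) (i : Int) (k m : Nat)
    (h1 : pyFindChar cs '<' = some k) (h2 : pyFindChar (cs.drop k) '>' = some m) :
    aLoop cs i =
      ((i + (k : Int)) :: (aLoop ((cs.drop k).drop m) (i + (k : Int) + (m : Int))).1,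
       (i + (k : Int) + (m : Int)) :: (aLoop ((cs.drop k).drop m) (i + (k : Int) + (m : Int))).2) := by
  rw [aLoop]
  split
  · simp_all
  · rename_i k' h1'
    rw [h1'] at h1
    injection h1 with h1
    subst h1
    split
    · simp_all
    · rename_i m' h2'
      rw [h2'] at h2
      injection h2 with h2
      subst h2
      rfl

-- shifting the suffix by one non-'<' character does not change A's loop result
theorem aLoop_shift (x : Char) (xs : List Char) (i : Int) (hx : x ≠ '<') :
    aLoop (x :: xs) i = aLoop xs (i + 1) := by
  have hfind : pyFindChar (x :: xs) '<' = (pyFindChar xs '<').map (· + 1) := by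
    simp [pyFindChar, hx]
  cases h1 : pyFindChar xs '<' with
  | none =>
    rw [aLoop_none _ _ (by simp [hfind, h1]), aLoop_none _ _ h1]
  | some k =>
    have h1' : pyFindChar (x :: xs) '<' = some (k + 1) := by simp [hfind, h1]
    have hdrop : (x :: xs).drop (k + 1) = xs.drop k := by simp
    cases h2 : pyFindChar (xs.drop k) '>' with
    | none =>
      rw [aLoop_some_none _ _ _ h1' (by rw [hdrop]; exact h2),
          aLoop_some_none _ _ _ h1 h2]
      push_cast
      ring_nf
    | some m =>
      rw [aLoop_some_some _ _ _ _ h1' (by rw [hdrop]; exact h2),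
          aLoop_some_some _ _ _ _ h1 h2, hdrop]
      have : i + ((k : Int) + 1) = i + 1 + (k : Int) := by ring
      push_cast
      ring_nf

-- and over characters that are not '>' it leaves the expecting-close state alone
theorem foldl_skip_false (l : List Char) (j : Int) (o c : List Int)
    (h : ∀ x ∈ l, x ≠ '>') :
    (PySem.List.enumerate l j).foldl bStep (o, c, false) = (o, c, false) := by
  induction l generalizing j with
  | nil => simp [PySem.List.enumerate_nil]
  | cons x xs ih =>
    have hx : x ≠ '>' := h x (by simp)
    rw [PySem.List.enumerate_cons]
    simp only [List.foldl_cons, bStep, hx, beq_iff_eq]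
    exact ih (j + 1) fun y hy => h y (by simp [hy])

-- the main invariant: B's flush-after-fold equals the accumulators followed by A's loop output
theorem main_inv : ∀ (n : Nat) (cs : List Char), cs.length ≤ n → ∀ (i : Int) (o c : List Int),
    bFlush ((PySem.List.enumerate cs i).foldl bStep (o, c, true)) =
      (o ++ (aLoop cs i).1, c ++ (aLoop cs i).2) := by
  intro n
  induction n with
  | zero =>
    intro cs hcs i o c
    have : cs = [] := List.length_eq_zero_iff.mp (Nat.le_zero.mp hcs)
    subst this
    rw [aLoop_none _ _ (by simp [pyFindChar])]
    simp [PySem.List.enumerate_nil, bFlush]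
  | succ n ih =>
    intro cs hcs i o c
    cases cs with
    | nil =>
      rw [aLoop_none _ _ (by simp [pyFindChar])]
      simp [PySem.List.enumerate_nil, bFlush]
    | cons x xs =>
      simp only [List.length_cons, Nat.succ_le_succ_iff] at hcs
      by_cases hx : x = '<'
      · subst hx
        have h1 : pyFindChar ('<' :: xs) '<' = some 0 := by simp [pyFindChar]
        rw [PySem.List.enumerate_cons, List.foldl_cons]
        have hstep : bStep (o, c, true) (i, '<') = (o ++ [i], c, false) := by simp [bStep]
        rw [hstep]
        cases h2 : pyFindChar xs '>' with
        | none =>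
          -- no '>' after this '<': fold skips everything, A exits with closing -1
          rw [foldl_skip_false xs (i + 1) (o ++ [i]) c
            (fun y hy => ((pyFindChar_eq_none_iff xs '>').mp h2) y hy)]
          have h2' : pyFindChar (('<' :: xs).drop 0) '>' = none := by
            simp [pyFindChar, h2]
          rw [aLoop_some_none _ _ _ h1 h2']
          simp [bFlush]
        | some m0 =>
          obtain ⟨hm0, htake, hdrop⟩ := pyFindChar_some_spec _ _ _ h2
          have h2' : pyFindChar (('<' :: xs).drop 0) '>' = some (m0 + 1) := by
            simp [pyFindChar, h2]
          rw [aLoop_some_some _ _ _ _ h1 h2']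
          have hA : (('<' :: xs).drop 0).drop (m0 + 1) = '>' :: xs.drop (m0 + 1) := by
            simpa using hdrop
          rw [hA, aLoop_shift '>' _ _ (by decide)]
          have e1 : i + ((0 : Nat) : Int) = i := by simp
          rw [e1]
          have e2 : i + (((m0 + 1 : Nat)) : Int) = i + 1 + (m0 : Int) := by push_cast; ring
          rw [e2]
          -- split xs at the first '>' on the fold side only
          have hxs : xs = xs.take m0 ++ xs.drop m0 := (List.take_append_drop m0 xs).symm
          conv_lhs => rw [hxs]
          rw [PySem.List.enumerate_append, List.foldl_append]
          rw [foldl_skip_false _ _ _ _ (fun y hy => htake y hy)]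
          have hlen : (xs.take m0).length = m0 := by
            simp [Nat.le_of_lt hm0]
          rw [hlen, hdrop, PySem.List.enumerate_cons, List.foldl_cons]
          have hstep2 : bStep (o ++ [i], c, false) (i + 1 + (m0 : Int), '>')
              = (o ++ [i], c ++ [i + 1 + (m0 : Int)], true) := by simp [bStep]
          rw [hstep2]
          have hxs2 : (xs.drop (m0 + 1)).length ≤ n := by
            simp only [List.length_drop]
            omega
          rw [ih (xs.drop (m0 + 1)) hxs2 (i + 1 + (m0 : Int) + 1) (o ++ [i]) (c ++ [i + 1 + (m0 : Int)])]
          simp [List.append_assoc]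
      · rw [PySem.List.enumerate_cons, List.foldl_cons]
        have hstep : bStep (o, c, true) (i, x) = (o, c, true) := by simp [bStep, hx]
        rw [hstep, ih xs hcs (i + 1) o c, aLoop_shift x xs i hx]

-- ===== VERDICT (by name: the statement is the Claim_ definition above) =====
theorem search_for_braces_spec : Claim_equal_search_for_braces := by
  intro document _
  unfold Spec_search_for_braces search_for_braces search_for_braces_alt
  have := main_inv document.toList.length document.toList le_rfl 0 [] []
  simpa using this.symm
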